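-- pv_equiv track=rewrite | github.com/lzyqwr/astrbot_plugin_mc_log_analysis | mc_log/domain/extraction.py | compose_lines_with_gaps
-- ===== SOURCE A (Python) =====
-- def compose_lines_with_gaps(lines: list[str], indexes: list[int]) -> str:
--     if not indexes:
--         return ""
--     result = []
--     prev = -2
--     for idx in indexes:
--         if idx < 0 or idx >= len(lines):
--             continue
--         if idx != prev + 1:
--             result.append("...[中间内容已省略]...")
--         result.append(lines[idx])
--         prev = idx
--     return "\n".join(result).strip()
-- ===== SOURCE B (Python) =====
-- GAP = "...[中间内容已省略]..."
--
--
-- def compose_lines_with_gaps(lines: list[str], indexes: list[int]) -> str: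
--     if not indexes:
--         return ""
--     valid = [i for i in indexes if 0 <= i < len(lines)]
--     if not valid:
--         return ""
--     seps = ["\n" if b == a + 1 else "\n" + GAP + "\n" for a, b in zip(valid, valid[1:])]
--     out = GAP + "\n" + lines[valid[0]] + "".join(
--         s + lines[i] for s, i in zip(seps, valid[1:]))
--     return out.strip()
-- ===== Notes on version B (the rewrite author's own statement) =====
-- stated objective: alternative
-- what changed: B has no scanning state and no parts list: it filters the in-range indexes, computes one separator string per adjacent pair via zip (newline for consecutive indexes, newline+marker+newline otherwise), and concatenates the first marker, the first line and the separator+line pieces into the result, instead of A's stateful prev-tracking loop that appends marker entries into a list joined by newline.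
import Mathlib
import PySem

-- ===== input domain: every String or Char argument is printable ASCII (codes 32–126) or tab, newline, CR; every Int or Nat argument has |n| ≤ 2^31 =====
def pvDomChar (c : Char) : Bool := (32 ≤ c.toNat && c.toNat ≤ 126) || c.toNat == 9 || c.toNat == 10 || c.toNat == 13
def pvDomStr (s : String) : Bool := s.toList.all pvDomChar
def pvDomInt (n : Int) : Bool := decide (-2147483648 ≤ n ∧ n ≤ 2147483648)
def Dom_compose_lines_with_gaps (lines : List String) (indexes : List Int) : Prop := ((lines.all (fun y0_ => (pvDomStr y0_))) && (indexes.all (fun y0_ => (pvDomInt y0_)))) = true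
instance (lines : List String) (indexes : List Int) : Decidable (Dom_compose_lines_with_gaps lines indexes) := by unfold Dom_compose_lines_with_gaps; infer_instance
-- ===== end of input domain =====

-- B replaces A's stateful prev-tracking loop (marker entries appended to a parts list,
-- joined by newline) by a stateless pairwise formulation: one separator per adjacent pair
-- of valid indexes (zip), concatenated around the line texts (objective: alternative).

def pvGap : String := "...[中间内容已省略]..."

-- ===== PORT A =====
-- A's loop body: skip out-of-range idx, append a marker on each jump, then the line.
def pvStepA (lines : List String) (st : List String × Int) (idx : Int) : List String × Int :=
  if idx < 0 ∨ (lines.length : Int) ≤ idx then st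
  else
    let r := if idx ≠ st.2 + 1 then st.1 ++ [pvGap] else st.1
    (r ++ [PySem.List.pyGetD lines idx ""], idx)

def compose_lines_with_gaps (lines : List String) (indexes : List Int) : String :=
  if indexes.isEmpty then "" else
    let st := indexes.foldl (pvStepA lines) ([], -2)
    PySem.Str.strip (PySem.Str.join "\n" st.1)

-- ===== PORT B =====
-- B: filter the valid indexes; one separator per adjacent pair via zip; concatenate.
def compose_lines_with_gaps_alt (lines : List String) (indexes : List Int) : String :=
  if indexes.isEmpty then "" else
    let valid := indexes.filter (fun i => decide (0 ≤ i) && decide (i < (lines.length : Int)))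
    if valid.isEmpty then "" else
      let vt := PySem.List.slice valid (some 1) none
      let seps := (valid.zip vt).map
        (fun p => if p.2 = p.1 + 1 then "\n" else "\n" ++ pvGap ++ "\n")
      PySem.Str.strip (pvGap ++ "\n" ++
        PySem.List.pyGetD lines (PySem.List.pyGetD valid 0 0) "" ++
        PySem.Str.join "" ((seps.zip vt).map
          (fun p => p.1 ++ PySem.List.pyGetD lines p.2 "")))

-- ===== PRECONDITION & SPEC =====
def Spec_compose_lines_with_gaps (lines : List String) (indexes : List Int) (out : String) : Prop := out = compose_lines_with_gaps_alt lines indexes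
instance (lines : List String) (indexes : List Int) (out : String) : Decidable (Spec_compose_lines_with_gaps lines indexes out) := by unfold Spec_compose_lines_with_gaps; infer_instance

-- ===== CLAIM (what is proved, stated in full; the proofs are below) =====
def Claim_equal_compose_lines_with_gaps : Prop := ∀ (lines : List String) (indexes : List Int), Dom_compose_lines_with_gaps lines indexes → Spec_compose_lines_with_gaps lines indexes (compose_lines_with_gaps lines indexes)

-- ===== LEMMAS AND PROOFS =====

-- What A's loop emits after filtering, on an already-valid list of indexes.
def pvEmit (lines : List String) : Int → List Int → List String
  | _, [] => []
  | prev, x :: rest =>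
    (if x ≠ prev + 1 then [pvGap] else []) ++
      PySem.List.pyGetD lines x "" :: pvEmit lines x rest

theorem pvFoldA_emit (lines : List String) (l : List Int) (acc : List String) (prev : Int) :
    (l.foldl (pvStepA lines) (acc, prev)).1
    = acc ++ pvEmit lines prev
        (l.filter (fun i => decide (0 ≤ i) && decide (i < (lines.length : Int)))) := by
  induction l generalizing acc prev with
  | nil => simp [pvEmit]
  | cons x rest ih =>
    rw [List.foldl_cons, List.filter_cons]
    by_cases h : x < 0 ∨ (lines.length : Int) ≤ x
    · have hf : ¬ ((decide (0 ≤ x) && decide (x < (lines.length : Int))) = true) := by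
        simp only [Bool.and_eq_true, decide_eq_true_eq, not_and]; omega
      have hstep : pvStepA lines (acc, prev) x = (acc, prev) := by simp [pvStepA, h]
      rw [if_neg hf, hstep, ih]
    · have hf : (decide (0 ≤ x) && decide (x < (lines.length : Int))) = true := by
        simp only [Bool.and_eq_true, decide_eq_true_eq]; omega
      rw [if_pos hf]
      have he : ∀ L, pvEmit lines prev (x :: L)
          = (if x ≠ prev + 1 then [pvGap] else []) ++
            PySem.List.pyGetD lines x "" :: pvEmit lines x L := fun _ => rfl
      by_cases hx : x = prev + 1
      · have hstep : pvStepA lines (acc, prev) x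
            = (acc ++ [PySem.List.pyGetD lines x ""], x) := by
          simp [pvStepA, hx]; omega
        rw [hstep, ih, he, if_neg (by simp [hx])]
        simp
      · have hstep : pvStepA lines (acc, prev) x
            = (acc ++ [pvGap, PySem.List.pyGetD lines x ""], x) := by
          simp [pvStepA, h, hx]
        rw [hstep, ih, he, if_pos hx]
        simp

-- The character stream of the output after the first line, as a function of the valid tail.
def pvTailC (lines : List String) : Int → List Int → List Char
  | _, [] => []
  | a, b :: rest =>
    (if b = a + 1 then "\n".toList else ("\n" ++ pvGap ++ "\n").toList) ++
      (PySem.List.pyGetD lines b "").toList ++ pvTailC lines b rest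

theorem pvJoin_empty_cons (x : String) (l : List String) :
    (PySem.Str.join "" (x :: l)).toList = x.toList ++ (PySem.Str.join "" l).toList := by
  cases l with
  | nil => simp [PySem.Str.toList_join, PySem.Chars.join_singleton, PySem.Chars.join_nil]
  | cons y r => simp [PySem.Str.toList_join, PySem.Chars.join_cons_cons]

theorem pvJoinA_eq (lines : List String) (vt : List Int) (v0 : Int) :
    (PySem.Str.join "\n" (PySem.List.pyGetD lines v0 "" :: pvEmit lines v0 vt)).toList
    = (PySem.List.pyGetD lines v0 "").toList ++ pvTailC lines v0 vt := by
  induction vt generalizing v0 with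
  | nil => simp [pvEmit, pvTailC, PySem.Str.toList_join, PySem.Chars.join_singleton]
  | cons b rest ih =>
    have ih' := ih b
    by_cases hb : b = v0 + 1
    · have he : pvEmit lines v0 (b :: rest)
          = PySem.List.pyGetD lines b "" :: pvEmit lines b rest := by
        simp [pvEmit, hb]
      have key : (PySem.Str.join "\n" (PySem.List.pyGetD lines v0 ""
            :: PySem.List.pyGetD lines b "" :: pvEmit lines b rest)).toList
          = (PySem.List.pyGetD lines v0 "").toList ++ "\n".toList ++
            (PySem.Str.join "\n" (PySem.List.pyGetD lines b "" :: pvEmit lines b rest)).toList := by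
        simp [PySem.Str.toList_join, PySem.Chars.join_cons_cons]
      rw [he, key, ih']
      simp [pvTailC, hb]
    · have he : pvEmit lines v0 (b :: rest)
          = pvGap :: PySem.List.pyGetD lines b "" :: pvEmit lines b rest := by
        simp [pvEmit, hb]
      have key : (PySem.Str.join "\n" (PySem.List.pyGetD lines v0 "" :: pvGap
            :: PySem.List.pyGetD lines b "" :: pvEmit lines b rest)).toList
          = (PySem.List.pyGetD lines v0 "").toList ++ "\n".toList ++ pvGap.toList ++ "\n".toList ++
            (PySem.Str.join "\n" (PySem.List.pyGetD lines b "" :: pvEmit lines b rest)).toList := by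
        simp [PySem.Str.toList_join, PySem.Chars.join_cons_cons]
      rw [he, key, ih']
      simp [pvTailC, hb]

theorem pvJoinB_eq (lines : List String) (vt : List Int) (v0 : Int) :
    (PySem.Str.join ""
      (((((v0 :: vt).zip vt).map
          (fun p => if p.2 = p.1 + 1 then "\n" else "\n" ++ pvGap ++ "\n")).zip vt).map
        (fun p => p.1 ++ PySem.List.pyGetD lines p.2 ""))).toList
    = pvTailC lines v0 vt := by
  induction vt generalizing v0 with
  | nil => simp [pvTailC, PySem.Str.toList_join, PySem.Chars.join_nil]
  | cons b rest ih =>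
    have ih' := ih b
    rw [show (v0 :: b :: rest).zip (b :: rest) = (v0, b) :: (b :: rest).zip rest from rfl,
        List.map_cons,
        show ((if b = v0 + 1 then "\n" else "\n" ++ pvGap ++ "\n")
              :: ((b :: rest).zip rest).map
                  (fun p => if p.2 = p.1 + 1 then "\n" else "\n" ++ pvGap ++ "\n")).zip (b :: rest)
            = ((if b = v0 + 1 then "\n" else "\n" ++ pvGap ++ "\n"), b)
              :: (((b :: rest).zip rest).map
                  (fun p => if p.2 = p.1 + 1 then "\n" else "\n" ++ pvGap ++ "\n")).zip rest from rfl,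
        List.map_cons, pvJoin_empty_cons, ih']
    by_cases hb : b = v0 + 1 <;> simp [pvTailC, hb]
-- ===== VERDICT (by name: the statement is the Claim_ definition above) =====
theorem compose_lines_with_gaps_spec : Claim_equal_compose_lines_with_gaps := by
  intro lines indexes _
  unfold Spec_compose_lines_with_gaps compose_lines_with_gaps compose_lines_with_gaps_alt
  by_cases h : indexes.isEmpty
  · simp [h]
  · simp only [h, Bool.false_eq_true, if_false]
    rw [pvFoldA_emit, List.nil_append]
    cases hv : indexes.filter (fun i => decide (0 ≤ i) && decide (i < (lines.length : Int))) with
    | nil =>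
      simp only [List.isEmpty_nil, if_true]
      refine String.toList_inj.mp ?_
      simp only [pvEmit, PySem.Str.toList_strip, PySem.Str.toList_join, List.map_nil,
        PySem.Chars.join_nil]
      decide
    | cons v0 vt =>
      have hm : v0 ∈ indexes.filter (fun i => decide (0 ≤ i) && decide (i < (lines.length : Int))) := by
        rw [hv]; exact List.mem_cons_self
      have hv0 : 0 ≤ v0 := by
        have := List.of_mem_filter hm
        simp only [Bool.and_eq_true, decide_eq_true_eq] at this
        exact this.1
      have he : pvEmit lines (-2) (v0 :: vt)
          = pvGap :: PySem.List.pyGetD lines v0 "" :: pvEmit lines v0 vt := by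
        have h1 : ¬ (v0 = -1) := by omega
        simp [pvEmit, h1]
      have hslice : PySem.List.slice (v0 :: vt) (some 1) none = vt := by
        rw [PySem.List.slice_from_one]; rfl
      have hget : PySem.List.pyGetD (v0 :: vt) 0 0 = v0 := by
        simp [PySem.List.pyGetD, PySem.List.pyGet?, PySem.List.pyIdx?]
      simp only [List.isEmpty_cons, if_false, Bool.false_eq_true, hslice, hget, he]
      refine String.toList_inj.mp ?_
      rw [PySem.Str.toList_strip, PySem.Str.toList_strip]
      congr 1
      have key : (PySem.Str.join "\n" (pvGap :: PySem.List.pyGetD lines v0 ""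
            :: pvEmit lines v0 vt)).toList
          = pvGap.toList ++ "\n".toList ++
            (PySem.Str.join "\n" (PySem.List.pyGetD lines v0 "" :: pvEmit lines v0 vt)).toList := by
        simp [PySem.Str.toList_join, PySem.Chars.join_cons_cons]
      rw [key, pvJoinA_eq]
      have hb := pvJoinB_eq lines vt v0
      simp only [String.toList_append, hb, List.append_assoc]
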